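-- pv_equiv track=rewrite | github.com/shinta-32/research_b4 | function_org.py | get_point_list_one_dim
-- ===== SOURCE A (Python) =====
-- def get_point_list_one_dim(answer_format):
--   point_list = []
--   point_1dim = []
--   point_list_1dim = []
--   if answer_format == 'color_phone':
--     for s in [0, 9, 19, 29, 39, 49, 59, 69, 79, 89, 99]:
--       # for h in [0, 29, 59, 89, 119, 149, 179, 209, 239, 269, 299, 329]:
--       for h in [0, 22, 44, 67, 89, 112, 134, 157, 179, 202, 224, 247, 269, 292, 314, 337]:
--         point_list.append([h, s])
--     for i in range(len(point_list)):
--       point_1dim = point_list[i][0] + 360 * point_list[i][1]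
--       point_list_1dim.append(point_1dim)
--   elif answer_format == 'color_car':
--     for s in [0, 9, 19, 29, 39, 49, 59, 69, 79, 89, 99]:
--       # for h in [0, 29, 59, 89, 119, 149, 179, 209, 239, 269, 299, 329]:
--       for h in [0, 22, 44, 67, 89, 112, 134, 157, 179, 202, 224, 247, 269, 292, 314, 337]:
--         point_list.append([h, s])
--     for i in range(len(point_list)):
--       point_1dim = point_list[i][0] + 360 * point_list[i][1]
--       point_list_1dim.append(point_1dim)
--   elif answer_format == 'Mii_physique':
--     for w in [0, 9, 19, 29, 39, 49, 59, 69, 79, 89, 99]: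
--       for h in [0, 9, 19, 29, 39, 49, 59, 69, 79, 89, 99]:
--         point_list.append([h, w])
--     for i in range(len(point_list)):
--       point_1dim = point_list[i][0] + 100 * point_list[i][1]
--       point_list_1dim.append(point_1dim)
--   elif answer_format == 'avatar_face':
--     for a in [0, 5, 10, 15, 20]:
--       for b in [0, 5, 10, 15, 20]:
--         for c in [0, 5, 10, 15, 20]:
--           for d in [0, 5, 10, 15, 20]:
--             point_list.append([a, b, c, d])
--     for i in range(len(point_list)):
--       point_1dim = point_list[i][3] + 21 * point_list[i][2] + 441 * point_list[i][1] + 9261 * point_list[i][0]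
--       point_list_1dim.append(point_1dim)
--   elif answer_format == 'action_unit_4':
--     for a in [1, 7, 13, 19]:
--       for b in [3, 10, 17]:
--         for c in [1, 7, 13, 19]:
--           for d in [3, 10, 17]:
--             point_list.append([a, b, c, d])
--     for i in range(len(point_list)):
--       point_1dim = point_list[i][3] + 21 * point_list[i][2] + 441 * point_list[i][1] + 9261 * point_list[i][0]
--       point_list_1dim.append(point_1dim)
--   elif answer_format == 'voice_3':
--     for speed in [8, 23, 38, 53, 68]:
--       for pitch in [0, 30, 60, 90, 120, 150]:
--         for happiness in [7, 19, 31, 43]: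
--           point_list.append([speed, pitch, happiness])
--     for i in range(len(point_list)):
--       point_1dim = point_list[i][2] + 51 * point_list[i][1] + 7701 * point_list[i][0]
--       point_list_1dim.append(point_1dim)
--   return  point_list_1dim
-- ===== SOURCE B (Python) =====
-- _TABLE = {
--     'color_phone': ([[0, 9, 19, 29, 39, 49, 59, 69, 79, 89, 99],
--                      [0, 22, 44, 67, 89, 112, 134, 157, 179, 202, 224, 247, 269, 292, 314, 337]],
--                     [360, 1]),
--     'color_car': ([[0, 9, 19, 29, 39, 49, 59, 69, 79, 89, 99],
--                    [0, 22, 44, 67, 89, 112, 134, 157, 179, 202, 224, 247, 269, 292, 314, 337]],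
--                   [360, 1]),
--     'Mii_physique': ([[0, 9, 19, 29, 39, 49, 59, 69, 79, 89, 99],
--                       [0, 9, 19, 29, 39, 49, 59, 69, 79, 89, 99]],
--                      [100, 1]),
--     'avatar_face': ([[0, 5, 10, 15, 20]] * 4, [9261, 441, 21, 1]),
--     'action_unit_4': ([[1, 7, 13, 19], [3, 10, 17], [1, 7, 13, 19], [3, 10, 17]],
--                       [9261, 441, 21, 1]),
--     'voice_3': ([[8, 23, 38, 53, 68], [0, 30, 60, 90, 120, 150], [7, 19, 31, 43]],
--                 [7701, 51, 1]),
-- }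
--
--
-- def _product(axes):
--     # all tuples of one value per axis, leftmost axis varying slowest
--     if not axes:
--         return [[]]
--     rest = _product(axes[1:])
--     return [[v] + combo for v in axes[0] for combo in rest]
--
--
-- def get_point_list_one_dim(answer_format):
--     entry = _TABLE.get(answer_format)
--     if entry is None:
--         return []
--     axes, weights = entry
--     return [sum(w * v for w, v in zip(weights, combo)) for combo in _product(axes)]
-- ===== Notes on version B (the rewrite author's own statement) =====
-- stated objective: idiomatic
-- what changed: Replaced six copy-pasted blocks of nested literal loops plus an index-based weighting pass with one dispatch table mapping each format to its axis lists and weight vector, a generic cartesian product, and a single dot-product comprehension.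
import Mathlib
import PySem

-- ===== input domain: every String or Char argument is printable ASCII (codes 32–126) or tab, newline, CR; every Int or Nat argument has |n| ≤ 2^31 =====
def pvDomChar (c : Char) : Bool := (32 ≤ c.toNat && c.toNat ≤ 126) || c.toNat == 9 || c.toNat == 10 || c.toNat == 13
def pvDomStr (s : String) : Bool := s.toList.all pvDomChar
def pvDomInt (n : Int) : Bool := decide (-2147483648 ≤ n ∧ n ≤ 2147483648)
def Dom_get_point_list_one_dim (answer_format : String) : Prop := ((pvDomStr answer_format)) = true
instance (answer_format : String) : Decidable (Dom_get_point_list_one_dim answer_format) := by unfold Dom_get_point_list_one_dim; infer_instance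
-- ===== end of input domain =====

-- B replaces A's six copy-pasted nested-loop blocks by a dispatch table (format ↦ axis lists + weights),
-- a generic cartesian product and one dot-product pass (objective: idiomatic).

-- ===== PORT A =====
-- literal transliteration: each branch builds point_list by nested foldl (append),
-- then a second indexed loop over range(len(point_list)) computes the weighted sum.
-- point_list[i][j] is always in range; pyGet? ... .getD 0 is exact here.
def get_point_list_one_dim (answer_format : String) : List Int :=
  if answer_format == "color_phone" then
    let point_list : List (List Int) :=
      ([0, 9, 19, 29, 39, 49, 59, 69, 79, 89, 99] : List Int).foldl (fun pl s =>
        ([0, 22, 44, 67, 89, 112, 134, 157, 179, 202, 224, 247, 269, 292, 314, 337] : List Int).foldl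
          (fun pl h => pl ++ [[h, s]]) pl) []
    (PySem.List.pyRange 0 point_list.length 1).foldl (fun acc i =>
      let row := PySem.List.pyGetD point_list i []
      acc ++ [PySem.List.pyGetD row 0 0 + 360 * PySem.List.pyGetD row 1 0]) []
  else if answer_format == "color_car" then
    let point_list : List (List Int) :=
      ([0, 9, 19, 29, 39, 49, 59, 69, 79, 89, 99] : List Int).foldl (fun pl s =>
        ([0, 22, 44, 67, 89, 112, 134, 157, 179, 202, 224, 247, 269, 292, 314, 337] : List Int).foldl
          (fun pl h => pl ++ [[h, s]]) pl) []
    (PySem.List.pyRange 0 point_list.length 1).foldl (fun acc i =>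
      let row := PySem.List.pyGetD point_list i []
      acc ++ [PySem.List.pyGetD row 0 0 + 360 * PySem.List.pyGetD row 1 0]) []
  else if answer_format == "Mii_physique" then
    let point_list : List (List Int) :=
      ([0, 9, 19, 29, 39, 49, 59, 69, 79, 89, 99] : List Int).foldl (fun pl w =>
        ([0, 9, 19, 29, 39, 49, 59, 69, 79, 89, 99] : List Int).foldl
          (fun pl h => pl ++ [[h, w]]) pl) []
    (PySem.List.pyRange 0 point_list.length 1).foldl (fun acc i =>
      let row := PySem.List.pyGetD point_list i []
      acc ++ [PySem.List.pyGetD row 0 0 + 100 * PySem.List.pyGetD row 1 0]) []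
  else if answer_format == "avatar_face" then
    let point_list : List (List Int) :=
      ([0, 5, 10, 15, 20] : List Int).foldl (fun pl a =>
        ([0, 5, 10, 15, 20] : List Int).foldl (fun pl b =>
          ([0, 5, 10, 15, 20] : List Int).foldl (fun pl c =>
            ([0, 5, 10, 15, 20] : List Int).foldl
              (fun pl d => pl ++ [[a, b, c, d]]) pl) pl) pl) []
    (PySem.List.pyRange 0 point_list.length 1).foldl (fun acc i =>
      let row := PySem.List.pyGetD point_list i []
      acc ++ [PySem.List.pyGetD row 3 0 + 21 * PySem.List.pyGetD row 2 0
              + 441 * PySem.List.pyGetD row 1 0 + 9261 * PySem.List.pyGetD row 0 0]) []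
  else if answer_format == "action_unit_4" then
    let point_list : List (List Int) :=
      ([1, 7, 13, 19] : List Int).foldl (fun pl a =>
        ([3, 10, 17] : List Int).foldl (fun pl b =>
          ([1, 7, 13, 19] : List Int).foldl (fun pl c =>
            ([3, 10, 17] : List Int).foldl
              (fun pl d => pl ++ [[a, b, c, d]]) pl) pl) pl) []
    (PySem.List.pyRange 0 point_list.length 1).foldl (fun acc i =>
      let row := PySem.List.pyGetD point_list i []
      acc ++ [PySem.List.pyGetD row 3 0 + 21 * PySem.List.pyGetD row 2 0
              + 441 * PySem.List.pyGetD row 1 0 + 9261 * PySem.List.pyGetD row 0 0]) []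
  else if answer_format == "voice_3" then
    let point_list : List (List Int) :=
      ([8, 23, 38, 53, 68] : List Int).foldl (fun pl speed =>
        ([0, 30, 60, 90, 120, 150] : List Int).foldl (fun pl pitch =>
          ([7, 19, 31, 43] : List Int).foldl
            (fun pl happiness => pl ++ [[speed, pitch, happiness]]) pl) pl) []
    (PySem.List.pyRange 0 point_list.length 1).foldl (fun acc i =>
      let row := PySem.List.pyGetD point_list i []
      acc ++ [PySem.List.pyGetD row 2 0 + 51 * PySem.List.pyGetD row 1 0
              + 7701 * PySem.List.pyGetD row 0 0]) []
  else []

-- ===== PORT B =====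
def pvTable : PySem.Dict String (List (List Int) × List Int) := PySem.Dict.mk
  [ ("color_phone", ([[0, 9, 19, 29, 39, 49, 59, 69, 79, 89, 99],
                      [0, 22, 44, 67, 89, 112, 134, 157, 179, 202, 224, 247, 269, 292, 314, 337]],
                     [360, 1])),
    ("color_car", ([[0, 9, 19, 29, 39, 49, 59, 69, 79, 89, 99],
                    [0, 22, 44, 67, 89, 112, 134, 157, 179, 202, 224, 247, 269, 292, 314, 337]],
                   [360, 1])),
    ("Mii_physique", ([[0, 9, 19, 29, 39, 49, 59, 69, 79, 89, 99],
                       [0, 9, 19, 29, 39, 49, 59, 69, 79, 89, 99]],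
                      [100, 1])),
    ("avatar_face", (List.replicate 4 [0, 5, 10, 15, 20], [9261, 441, 21, 1])),
    ("action_unit_4", ([[1, 7, 13, 19], [3, 10, 17], [1, 7, 13, 19], [3, 10, 17]],
                       [9261, 441, 21, 1])),
    ("voice_3", ([[8, 23, 38, 53, 68], [0, 30, 60, 90, 120, 150], [7, 19, 31, 43]],
                 [7701, 51, 1])) ]

-- cartesian product of the axis lists, leftmost axis varying slowest (Source B's _product)
def pvProduct : List (List Int) → List (List Int)
  | [] => [[]]
  | axis :: rest => axis.flatMap (fun v => (pvProduct rest).map (fun combo => v :: combo))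

def get_point_list_one_dim_alt (answer_format : String) : List Int :=
  match pvTable.get? answer_format with
  | none => []
  | some (axes, weights) =>
    (pvProduct axes).map (fun combo => (List.zipWith (· * ·) weights combo).sum)

-- ===== PRECONDITION & SPEC =====
def Spec_get_point_list_one_dim (answer_format : String) (out : List Int) : Prop := out = get_point_list_one_dim_alt answer_format
instance (answer_format : String) (out : List Int) : Decidable (Spec_get_point_list_one_dim answer_format out) := by unfold Spec_get_point_list_one_dim; infer_instance

-- ===== CLAIM (what is proved, stated in full; the proofs are below) =====
def Claim_equal_get_point_list_one_dim : Prop := ∀ (answer_format : String), Dom_get_point_list_one_dim answer_format → Spec_get_point_list_one_dim answer_format (get_point_list_one_dim answer_format)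

-- ===== LEMMAS AND PROOFS =====

-- ===== VERDICT (by name: the statement is the Claim_ definition above) =====
set_option maxRecDepth 100000 in
set_option maxHeartbeats 8000000 in
theorem get_point_list_one_dim_spec : Claim_equal_get_point_list_one_dim := by
  intro s _
  unfold Spec_get_point_list_one_dim
  by_cases h1 : s = "color_phone"
  · subst h1; decide
  by_cases h2 : s = "color_car"
  · subst h2; decide
  by_cases h3 : s = "Mii_physique"
  · subst h3; decide
  by_cases h4 : s = "avatar_face"
  · subst h4; decide
  by_cases h5 : s = "action_unit_4"
  · subst h5; decide
  by_cases h6 : s = "voice_3"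
  · subst h6; decide
  have b1 : ("color_phone" == s) = false := beq_eq_false_iff_ne.mpr (Ne.symm h1)
  have b2 : ("color_car" == s) = false := beq_eq_false_iff_ne.mpr (Ne.symm h2)
  have b3 : ("Mii_physique" == s) = false := beq_eq_false_iff_ne.mpr (Ne.symm h3)
  have b4 : ("avatar_face" == s) = false := beq_eq_false_iff_ne.mpr (Ne.symm h4)
  have b5 : ("action_unit_4" == s) = false := beq_eq_false_iff_ne.mpr (Ne.symm h5)
  have b6 : ("voice_3" == s) = false := beq_eq_false_iff_ne.mpr (Ne.symm h6)
  simp [get_point_list_one_dim, get_point_list_one_dim_alt, pvTable, PySem.Dict.get?,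
        List.find?, h1, h2, h3, h4, h5, h6, b1, b2, b3, b4, b5, b6]
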